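-- pv_equiv track=rewrite | github.com/ykhan007/Final-Question-2 | q2_final.py | make_base_grid
-- ===== SOURCE A (Python) =====
-- def make_base_grid(size, stop):
--     """Build TL-based grid where each diagonal r+c has same value."""
--     grid = []
--     for r in range(size):
--         row = []
--         for c in range(size):
--             val = r + c + 1          # diagonal index + 1
--             if val <= stop:
--                 row.append(val)
--             else:
--                 row.append(0)
--         grid.append(row)
--     return grid
-- ===== SOURCE B (Python) =====
-- def make_base_grid(size, stop):
--     """Build TL-based grid where each diagonal r+c has same value."""
--     grid = []
--     for r in range(size):
--         k = min(max(stop - r, 0), size)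
--         grid.append(list(range(r + 1, r + k + 1)) + [0] * (size - k))
--     return grid
-- ===== Notes on version B (the rewrite author's own statement) =====
-- stated objective: simpler
-- what changed: Each row is built as a closed form — the run of diagonal values range(r+1, r+k+1) with k = min(max(stop-r,0), size) followed by zero padding — removing the inner per-cell loop and branch.
import Mathlib
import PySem

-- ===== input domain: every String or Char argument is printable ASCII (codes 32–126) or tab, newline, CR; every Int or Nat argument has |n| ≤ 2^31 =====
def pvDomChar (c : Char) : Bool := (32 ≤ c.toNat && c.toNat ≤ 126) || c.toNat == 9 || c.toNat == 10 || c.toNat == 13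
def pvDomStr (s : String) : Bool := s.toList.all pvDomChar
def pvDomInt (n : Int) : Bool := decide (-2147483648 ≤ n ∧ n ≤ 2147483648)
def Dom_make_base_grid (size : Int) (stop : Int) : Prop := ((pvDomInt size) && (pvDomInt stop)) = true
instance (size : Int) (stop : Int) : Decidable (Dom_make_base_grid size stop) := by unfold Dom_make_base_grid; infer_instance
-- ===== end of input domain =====

-- B replaces the per-cell branch by a per-row closed form (a range of values followed by zeros); objective: simpler.

-- ===== PORT A =====
def make_base_grid (size : Int) (stop : Int) : List (List Int) :=
  (PySem.List.pyRange 0 size 1).foldl (fun grid r =>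
    let row := (PySem.List.pyRange 0 size 1).foldl (fun row c =>
      let val := r + c + 1
      if val ≤ stop then row ++ [val] else row ++ [0]) []
    grid ++ [row]) []

-- ===== PORT B =====
def make_base_grid_alt (size : Int) (stop : Int) : List (List Int) :=
  (PySem.List.pyRange 0 size 1).foldl (fun grid r =>
    let k := min (max (stop - r) 0) size
    grid ++ [PySem.List.pyRange (r + 1) (r + k + 1) 1 ++ List.replicate (size - k).toNat 0]) []

-- ===== PRECONDITION & SPEC =====
def Spec_make_base_grid (size : Int) (stop : Int) (out : List (List Int)) : Prop := out = make_base_grid_alt size stop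
instance (size : Int) (stop : Int) (out : List (List Int)) : Decidable (Spec_make_base_grid size stop out) := by unfold Spec_make_base_grid; infer_instance

-- ===== CLAIM (what is proved, stated in full; the proofs are below) =====
def Claim_equal_make_base_grid : Prop := ∀ (size : Int) (stop : Int), Dom_make_base_grid size stop → Spec_make_base_grid size stop (make_base_grid size stop)

-- ===== LEMMAS AND PROOFS =====

-- A's inner loop is an append-one-per-step fold: it is the map of the branch value.
theorem rowA_eq_map (size stop r : Int) :
    (PySem.List.pyRange 0 size 1).foldl (fun row c =>
      let val := r + c + 1
      if val ≤ stop then row ++ [val] else row ++ [0]) [] =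
    (PySem.List.pyRange 0 size 1).map (fun c => if r + c + 1 ≤ stop then r + c + 1 else 0) := by
  have h : (fun (row : List Int) c =>
      let val := r + c + 1
      if val ≤ stop then row ++ [val] else row ++ [0]) =
      fun (row : List Int) c => row ++ [if r + c + 1 ≤ stop then r + c + 1 else 0] := by
    funext row c; by_cases hc : r + c + 1 ≤ stop <;> simp [hc]
  rw [h, PySem.List.foldl_append_singleton_eq_map, List.nil_append]

theorem map_shift_pyRange (a b t : Int) :
    (PySem.List.pyRange a b 1).map (fun c => t + c + 1) =
    PySem.List.pyRange (t + a + 1) (t + b + 1) 1 := by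
  rw [PySem.List.pyRange_one, PySem.List.pyRange_one]
  have hn : (t + b + 1 - (t + a + 1)) = b - a := by ring
  rw [hn, List.map_map]
  refine List.map_congr_left ?_
  intro j _
  simp; ring

-- One row of A equals one row of B: leading diagonal values, then zeros.
theorem row_eq (size stop r : Int) :
    (PySem.List.pyRange 0 size 1).map (fun c => if r + c + 1 ≤ stop then r + c + 1 else 0) =
    PySem.List.pyRange (r + 1) (r + min (max (stop - r) 0) size + 1) 1 ++
      List.replicate (size - min (max (stop - r) 0) size).toNat 0 := by
  set k := min (max (stop - r) 0) size with hk
  by_cases hs : size ≤ 0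
  · have hk' : k = size := by omega
    rw [PySem.List.pyRange_one_eq_nil hs, PySem.List.pyRange_one_eq_nil (by omega), hk']
    simp
  · have hk0 : 0 ≤ k := by omega
    have hks : k ≤ size := by omega
    rw [PySem.List.pyRange_one_append 0 k size hk0 hks, List.map_append]
    congr 1
    · rw [List.map_congr_left (g := fun c => r + c + 1) ?_]
      · have := map_shift_pyRange 0 k r
        rw [this]
        norm_num
      · intro c hc
        rw [PySem.List.mem_pyRange_one] at hc
        rw [if_pos (by omega)]
    · rw [List.map_congr_left (g := fun _ => (0 : Int)) ?_]
      · rw [List.map_const', PySem.List.length_pyRange_one]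
      · intro c hc
        rw [PySem.List.mem_pyRange_one] at hc
        rw [if_neg (by omega)]

-- ===== VERDICT (by name: the statement is the Claim_ definition above) =====
theorem make_base_grid_spec : Claim_equal_make_base_grid := by
  intro size stop _
  unfold Spec_make_base_grid make_base_grid make_base_grid_alt
  simp only []
  rw [PySem.List.foldl_append_singleton_eq_map, PySem.List.foldl_append_singleton_eq_map,
    List.nil_append, List.nil_append]
  refine List.map_congr_left ?_
  intro r _
  rw [rowA_eq_map]
  exact row_eq size stop r
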